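-- pv_equiv track=rewrite | github.com/PeppeOsmio/tesi | tesi/zappai/utils/common.py | get_previous_n_months
-- ===== SOURCE A (Python) =====
-- def get_previous_n_months(n: int, month: int, year: int) -> tuple[int, int]:
--     if n < 1:
--         raise ValueError(f"n can't be less than 1")
--
--     result_month, result_year = month, year
--
--     for _ in range(n):
--         if result_month == 1:
--             result_month = 12
--             result_year -= 1
--             continue
--         result_month -= 1
--
--     return result_month, result_year
-- ===== SOURCE B (Python) =====
-- def get_previous_n_months(n: int, month: int, year: int) -> tuple[int, int]:
--     if n < 1:
--         raise ValueError(f"n can't be less than 1")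
--     total = year * 12 + (month - 1) - n
--     return total % 12 + 1, total // 12
-- ===== Notes on version B (the rewrite author's own statement) =====
-- stated objective: faster
-- what changed: Replaces the n-step decrement loop with O(1) divmod arithmetic on the total month index year*12+month-1; Pre_ excludes n<1 (A raises ValueError) and month<=0, which is not a calendar month and outside the function's natural domain.
-- intended difference: For start months above 12 (invalid calendar months) with month-n still above 12, A's loop just subtracts and returns a non-month like (13, 2020); B normalizes through month-index arithmetic and returns a valid month with the carried year, the intended value for going back n months. — e.g. on get_previous_n_months(1, 14, 2020): A returns (13, 2020), B returns (1, 2021)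
-- outside the precondition, e.g. on get_previous_n_months(1, 0, 2020): A returns (-1, 2020), B returns (11, 2019)
import Mathlib
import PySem

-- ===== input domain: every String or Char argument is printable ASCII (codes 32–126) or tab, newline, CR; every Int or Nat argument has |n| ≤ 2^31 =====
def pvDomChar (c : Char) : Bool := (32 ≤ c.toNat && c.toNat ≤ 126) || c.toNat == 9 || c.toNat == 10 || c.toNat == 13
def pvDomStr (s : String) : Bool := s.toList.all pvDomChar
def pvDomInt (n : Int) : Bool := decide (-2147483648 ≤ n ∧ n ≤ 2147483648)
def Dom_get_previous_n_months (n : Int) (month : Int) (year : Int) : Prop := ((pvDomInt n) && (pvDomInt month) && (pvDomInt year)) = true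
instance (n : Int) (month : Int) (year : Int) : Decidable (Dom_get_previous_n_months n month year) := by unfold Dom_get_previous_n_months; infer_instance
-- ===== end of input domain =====

-- B replaces A's n-step decrement loop with O(1) divmod arithmetic on the total month index.


-- ===== PORT A =====
-- the 'for _ in range(n)' loop over state (result_month, result_year)
def pvLoopA : Nat → Int → Int → Int × Int
  | 0, m, y => (m, y)
  | k + 1, m, y => if m == 1 then pvLoopA k 12 (y - 1) else pvLoopA k (m - 1) y

def get_previous_n_months (n : Int) (month : Int) (year : Int) : Int × Int :=
  pvLoopA n.toNat month year

-- ===== PORT B =====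
def get_previous_n_months_alt (n : Int) (month : Int) (year : Int) : Int × Int :=
  let total := year * 12 + (month - 1) - n
  (PySem.Int.mod total 12 + 1, PySem.Int.floordiv total 12)

-- ===== PRECONDITION & SPEC =====
-- Pre_ excludes n < 1, where A raises ValueError, and month ≤ 0, which is not a calendar
-- month and so outside the function's natural domain.
def Pre_get_previous_n_months (n : Int) (month : Int) (year : Int) : Prop := 1 ≤ n ∧ 1 ≤ month
instance (n : Int) (month : Int) (year : Int) : Decidable (Pre_get_previous_n_months n month year) := by unfold Pre_get_previous_n_months; infer_instance
def pvWitness_get_previous_n_months : Int × Int × Int := (3, 2, 2020)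

-- For start months above 12 (not valid calendar months) with month - n still above 12, A's loop
-- just subtracts and returns a non-month like (13, 2020); B normalizes through month-index
-- arithmetic and returns a valid month with the carried year, the intended value for going back
-- n months.
def D_get_previous_n_months (n : Int) (month : Int) (year : Int) : Prop :=
  month > 12 ∧ month - n > 12
instance (n : Int) (month : Int) (year : Int) : Decidable (D_get_previous_n_months n month year) := by unfold D_get_previous_n_months; infer_instance

def Spec_get_previous_n_months (n : Int) (month : Int) (year : Int) (out : Int × Int) : Prop := ¬ D_get_previous_n_months n month year → out = get_previous_n_months_alt n month year
instance (n : Int) (month : Int) (year : Int) (out : Int × Int) : Decidable (Spec_get_previous_n_months n month year out) := by unfold Spec_get_previous_n_months; infer_instance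

def pvDiffWitness_get_previous_n_months : Int × Int × Int := (1, 14, 2020)
def pvDiffWitnessOut_get_previous_n_months : (Int × Int) × (Int × Int) := ((13, 2020), (1, 2021))

-- ===== CLAIM (what is proved, stated in full; the proofs are below) =====
def Claim_unchanged_get_previous_n_months : Prop := ∀ (n : Int) (month : Int) (year : Int), Dom_get_previous_n_months n month year → Pre_get_previous_n_months n month year → Spec_get_previous_n_months n month year (get_previous_n_months n month year)
def Claim_changed_get_previous_n_months : Prop := Dom_get_previous_n_months (pvDiffWitness_get_previous_n_months.1) (pvDiffWitness_get_previous_n_months.2.1) (pvDiffWitness_get_previous_n_months.2.2) ∧ Pre_get_previous_n_months (pvDiffWitness_get_previous_n_months.1) (pvDiffWitness_get_previous_n_months.2.1) (pvDiffWitness_get_previous_n_months.2.2) ∧ D_get_previous_n_months (pvDiffWitness_get_previous_n_months.1) (pvDiffWitness_get_previous_n_months.2.1) (pvDiffWitness_get_previous_n_months.2.2) ∧ get_previous_n_months (pvDiffWitness_get_previous_n_months.1) (pvDiffWitness_get_previous_n_months.2.1) (pvDiffWitness_get_previous_n_months.2.2) = pvDiffWitnessOut_get_previous_n_months.1 ∧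 get_previous_n_months_alt (pvDiffWitness_get_previous_n_months.1) (pvDiffWitness_get_previous_n_months.2.1) (pvDiffWitness_get_previous_n_months.2.2) = pvDiffWitnessOut_get_previous_n_months.2 ∧ pvDiffWitnessOut_get_previous_n_months.1 ≠ pvDiffWitnessOut_get_previous_n_months.2
def Claim_exact_get_previous_n_months : Prop := ∀ (n : Int) (month : Int) (year : Int), Dom_get_previous_n_months n month year → Pre_get_previous_n_months n month year → D_get_previous_n_months n month year → get_previous_n_months n month year ≠ get_previous_n_months_alt n month year

-- ===== LEMMAS AND PROOFS =====
-- closed-form characterisation of A's loop, for every step count k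
theorem pvLoopA_closed (k : Nat) : ∀ (m y : Int),
    pvLoopA k m y =
      if m ≤ 0 ∨ m - (k : Int) > 12 then (m - (k : Int), y)
      else ((m - 1 - (k : Int)) % 12 + 1, y + (m - 1 - (k : Int)) / 12) := by
  induction k with
  | zero =>
    intro m y
    simp only [pvLoopA, Nat.cast_zero, Int.sub_zero]
    split_ifs with h
    · rfl
    · simp only [Prod.mk.injEq]
      constructor <;> omega
  | succ k ih =>
    intro m y
    have hc : ((k + 1 : Nat) : Int) = (k : Int) + 1 := by push_cast; ring
    simp only [pvLoopA]
    by_cases hm : m = 1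
    · subst hm
      rw [if_pos (by decide), ih, hc]
      rw [if_neg (by omega), if_neg (by omega)]
      simp only [Prod.mk.injEq]
      constructor <;> omega
    · rw [if_neg (by simpa using hm), ih, hc]
      by_cases h1 : m - 1 ≤ 0 ∨ m - 1 - (k : Int) > 12
      · have h2 : m ≤ 0 ∨ m - ((k : Int) + 1) > 12 := by
          rcases h1 with h | h
          · exact Or.inl (by omega)
          · exact Or.inr (by omega)
        rw [if_pos h1, if_pos h2]
        simp only [Prod.mk.injEq]
        exact ⟨by omega, trivial⟩
      · rw [not_or] at h1
        rw [if_neg (by omega), if_neg (by omega)]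
        simp only [Prod.mk.injEq]
        constructor <;> omega

-- ===== VERDICT (by name: the statement is the Claim_ definition above) =====
theorem get_previous_n_months_spec : Claim_unchanged_get_previous_n_months := by
  intro n month year _hdom hpre hnd
  obtain ⟨hn, hm⟩ := hpre
  unfold D_get_previous_n_months at hnd
  unfold get_previous_n_months get_previous_n_months_alt
  have hcast : ((n.toNat : Int)) = n := Int.toNat_of_nonneg (by omega)
  rw [pvLoopA_closed, hcast, if_neg (by omega)]
  simp only [PySem.Int.mod, PySem.Int.floordiv, Int.fmod_eq_emod, Int.fdiv_eq_ediv, Prod.mk.injEq]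
  constructor <;> omega

theorem get_previous_n_months_changed : Claim_changed_get_previous_n_months := by
  unfold Claim_changed_get_previous_n_months; decide

theorem get_previous_n_months_tight : Claim_exact_get_previous_n_months := by
  intro n month year _hdom hpre hd heq
  obtain ⟨hn, hm⟩ := hpre
  unfold D_get_previous_n_months at hd
  unfold get_previous_n_months get_previous_n_months_alt at heq
  have hcast : ((n.toNat : Int)) = n := Int.toNat_of_nonneg (by omega)
  rw [pvLoopA_closed, hcast, if_pos (by omega)] at heq
  simp only [PySem.Int.mod, PySem.Int.floordiv, Int.fmod_eq_emod, Prod.mk.injEq] at heq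
  omega
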